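-- pv_equiv track=rewrite | github.com/YuvarajSisinty/pass_Strength_classifier | app project/password_strength_classifier/feature_extractor.py | _detect_keyboard_patterns
-- ===== SOURCE A (Python) =====
-- def _detect_keyboard_patterns(password: str) -> int:
--     """Detect common keyboard patterns (qwerty, asdf, etc.)"""
--     keyboard_rows = ['qwertyuiop', 'asdfghjkl', 'zxcvbnm', '1234567890']
--     count = 0
--     password_lower = password.lower()
--
--     for row in keyboard_rows:
--         for i in range(len(row) - 2):
--             pattern = row[i:i+3]
--             if pattern in password_lower:
--                 count += 1
--
--     return count
-- ===== SOURCE B (Python) =====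
-- def _detect_keyboard_patterns(password: str) -> int:
--     """Detect common keyboard patterns (qwerty, asdf, etc.)"""
--     keyboard_rows = ['qwertyuiop', 'asdfghjkl', 'zxcvbnm', '1234567890']
--     patterns = {row[i:i+3] for row in keyboard_rows for i in range(len(row) - 2)}
--     pw = password.lower()
--     grams = {pw[i:i+3] for i in range(len(pw) - 2)}
--     return len(grams & patterns)
-- ===== Notes on version B (the rewrite author's own statement) =====
-- stated objective: alternative
-- what changed: Instead of scanning the whole password once per keyboard-row trigram (31 substring scans), B collects the set of 3-grams of the lowered password in one pass and returns the size of its intersection with the precomputed set of keyboard-row trigrams; it trades the repeated C-level substring scans for a single gram-set build plus a set intersection.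
import Mathlib
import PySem

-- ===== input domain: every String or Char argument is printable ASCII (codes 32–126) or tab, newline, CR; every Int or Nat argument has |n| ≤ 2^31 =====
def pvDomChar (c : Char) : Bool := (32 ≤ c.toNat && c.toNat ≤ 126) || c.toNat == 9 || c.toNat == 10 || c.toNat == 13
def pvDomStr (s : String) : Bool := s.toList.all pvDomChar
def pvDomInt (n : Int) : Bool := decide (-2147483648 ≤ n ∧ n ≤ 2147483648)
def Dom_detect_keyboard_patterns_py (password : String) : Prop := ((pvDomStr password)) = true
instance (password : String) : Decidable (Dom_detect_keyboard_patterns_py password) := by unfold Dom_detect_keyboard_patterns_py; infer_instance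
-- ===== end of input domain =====

-- B replaces the per-trigram substring scans of A with one pass collecting the password's
-- 3-grams into a set and returning the size of its intersection with the precomputed
-- keyboard-trigram set (alternative algorithm: one pass plus set intersection).


-- ===== PORT A =====
def detect_keyboard_patterns_py (password : String) : Int :=
  let keyboard_rows : List String := ["qwertyuiop", "asdfghjkl", "zxcvbnm", "1234567890"]
  let count : Int := 0
  let password_lower := PySem.Str.lower password
  keyboard_rows.foldl (fun count row =>
    (PySem.List.pyRange 0 (PySem.Str.len row - 2)).foldl (fun count i =>
      let pattern := PySem.Str.slice row (some i) (some (i + 3))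
      if PySem.Str.isIn pattern password_lower then count + 1 else count) count) count

-- ===== PORT B =====
def pvRows : List String := ["qwertyuiop", "asdfghjkl", "zxcvbnm", "1234567890"]

-- patterns = {row[i:i+3] for row in keyboard_rows for i in range(len(row) - 2)}
def pvPatterns : PySem.Set String :=
  PySem.Set.ofList (pvRows.flatMap (fun row =>
    (PySem.List.pyRange 0 (PySem.Str.len row - 2)).map
      (fun i => PySem.Str.slice row (some i) (some (i + 3)))))

def detect_keyboard_patterns_py_alt (password : String) : Int :=
  let pw := PySem.Str.lower password
  let grams : PySem.Set String :=
    PySem.Set.ofList ((PySem.List.pyRange 0 (PySem.Str.len pw - 2)).map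
      (fun i => PySem.Str.slice pw (some i) (some (i + 3))))
  PySem.Set.len (PySem.Set.inter grams pvPatterns)

-- ===== PRECONDITION & SPEC =====
def Spec_detect_keyboard_patterns_py (password : String) (out : Int) : Prop := out = detect_keyboard_patterns_py_alt password
instance (password : String) (out : Int) : Decidable (Spec_detect_keyboard_patterns_py password out) := by unfold Spec_detect_keyboard_patterns_py; infer_instance

-- ===== CLAIM (what is proved, stated in full; the proofs are below) =====
def Claim_equal_detect_keyboard_patterns_py : Prop := ∀ (password : String), Dom_detect_keyboard_patterns_py password → Spec_detect_keyboard_patterns_py password (detect_keyboard_patterns_py password)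

-- ===== LEMMAS AND PROOFS =====

-- the list of 3-grams of a string s (what B's port dedups into its `grams` set)
def pvGrams (s : String) : List String :=
  (PySem.List.pyRange 0 (PySem.Str.len s - 2)).map
    (fun i => PySem.Str.slice s (some i) (some (i + 3)))

-- the flat list of keyboard trigrams that pvPatterns dedups (it is already duplicate-free)
def pvPatternList : List String :=
  pvRows.flatMap (fun row =>
    (PySem.List.pyRange 0 (PySem.Str.len row - 2)).map
      (fun i => PySem.Str.slice row (some i) (some (i + 3))))

-- a length-3 string is among the 3-grams of s iff it is a substring of s
lemma mem_pvGrams {s p : String} (hp : p.toList.length = 3) :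
    p ∈ pvGrams s ↔ PySem.Str.isIn p s = true := by
  rw [PySem.Str.isIn_eq, ← PySem.Chars.exists_prefix_drop_iff_isIn]
  unfold pvGrams
  simp only [List.mem_map, PySem.List.mem_pyRange_one, PySem.Str.len_eq]
  constructor
  · rintro ⟨i, ⟨h0, hi⟩, rfl⟩
    refine ⟨i.toNat, ?_⟩
    have hsl : (PySem.Str.slice s (some i) (some (i + 3))).toList
        = List.take 3 (List.drop i.toNat s.toList) := by
      rw [PySem.Str.toList_slice]
      show PySem.List.slice _ _ _ = _
      rw [PySem.List.slice_toNat _ h0 (by omega)]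
      congr 1
      omega
    rw [hsl]
    exact List.take_prefix _ _
  · rintro ⟨j, hpre⟩
    have htake := List.prefix_iff_eq_take.mp hpre
    rw [hp] at htake
    have hlen : j + 3 ≤ s.toList.length := by
      have h := congrArg List.length htake
      rw [hp, List.length_take, List.length_drop] at h
      omega
    refine ⟨(j : Int), ⟨by positivity, by omega⟩, ?_⟩
    apply String.toList_inj.mp
    rw [PySem.Str.toList_slice]
    show PySem.List.slice _ _ _ = _
    rw [PySem.List.slice_toNat _ (by positivity) (by positivity)]
    have h3 : ((j : Int) + 3).toNat - ((j : Int)).toNat = 3 := by omega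
    rw [h3, Int.toNat_natCast, ← htake]

-- A's nested loops count exactly the keyboard trigrams that occur in the lowered password
lemma A_expand (password : String) :
    detect_keyboard_patterns_py password =
      ((pvPatternList.countP (fun p => PySem.Str.isIn p (PySem.Str.lower password))) : Int) := by
  unfold detect_keyboard_patterns_py pvPatternList pvRows
  simp only [List.foldl_cons, List.foldl_nil, PySem.List.foldl_count_if,
    List.flatMap_cons, List.flatMap_nil, List.countP_append, List.countP_map, List.append_nil]
  push_cast
  ring_nf
  rfl

-- counting s's elements lying in t equals counting t's elements lying in s (both duplicate-free)
lemma countP_mem_comm {α : Type} [DecidableEq α] {s t : List α}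
    (hs : s.Nodup) (ht : t.Nodup) :
    s.countP (fun x => decide (x ∈ t)) = t.countP (fun x => decide (x ∈ s)) := by
  rw [List.countP_eq_length_filter, List.countP_eq_length_filter,
      ← List.toFinset_card_of_nodup (hs.filter _), ← List.toFinset_card_of_nodup (ht.filter _)]
  congr 1
  ext x
  simp
  tauto

lemma patterns_eq : pvPatterns = pvPatternList := by decide

lemma patternList_nodup : pvPatternList.Nodup := by decide

lemma patternList_len3 : ∀ p ∈ pvPatternList, p.toList.length = 3 := by decide

-- ===== VERDICT (by name: the statement is the Claim_ definition above) =====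
theorem detect_keyboard_patterns_py_spec : Claim_equal_detect_keyboard_patterns_py := by
  intro password _
  unfold Spec_detect_keyboard_patterns_py
  rw [A_expand]
  show _ = PySem.Set.len (PySem.Set.inter (PySem.Set.ofList (pvGrams (PySem.Str.lower password))) pvPatterns)
  set pl := PySem.Str.lower password
  set G : PySem.Set String := PySem.Set.ofList (pvGrams pl) with hG
  have hcont : ∀ x, pvPatterns.contains x = decide (x ∈ pvPatterns) := by
    intro x
    by_cases h : x ∈ pvPatterns
    · simp [h, (PySem.Set.contains_iff pvPatterns x).mpr h]
    · simp only [h, decide_false]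
      cases hb : pvPatterns.contains x
      · rfl
      · exact absurd ((PySem.Set.contains_iff pvPatterns x).mp hb) h
  unfold PySem.Set.len PySem.Set.inter
  rw [← List.countP_eq_length_filter]
  have h1 : List.countP (fun x => pvPatterns.contains x) G
      = List.countP (fun x => decide (x ∈ pvPatterns)) G := by
    apply List.countP_congr; intro x _; rw [hcont]
  rw [h1, countP_mem_comm (PySem.Set.nodup_ofList _) (by rw [patterns_eq]; exact patternList_nodup),
      patterns_eq]
  have h2 : List.countP (fun x => decide (x ∈ G)) pvPatternList
      = List.countP (fun p => PySem.Str.isIn p pl) pvPatternList := by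
    apply List.countP_congr
    intro p hpmem
    have h3 := mem_pvGrams (s := pl) (patternList_len3 p hpmem)
    rw [show (decide (p ∈ PySem.Set.ofList (pvGrams pl)) = true) ↔ p ∈ pvGrams pl by
          simp [PySem.Set.mem_ofList]]
    exact h3
  rw [h2]
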